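-- pv_equiv track=rewrite | github.com/NicGagnon/adventcode | 6/6.py | indirect_orbits
-- ===== SOURCE A (Python) =====
-- def indirect_orbits(obj, orbits):
--   if obj not in orbits:
--     return 0
--   else:
--     ind_count = 0
--     for i in orbits[obj]:
--       ind_count += 1 + indirect_orbits(i, orbits)
--     return ind_count
-- ===== SOURCE B (Python) =====
-- def indirect_orbits(obj, orbits):
--     count = 0
--     stack = [obj]
--     while stack:
--         node = stack.pop()
--         if node in orbits:
--             for child in orbits[node]:
--                 count += 1
--                 stack.append(child)
--     return count
-- ===== Notes on version B (the rewrite author's own statement) =====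
-- stated objective: alternative
-- what changed: Replaces A's recursive descent over the orbit map with an explicit worklist loop (pop a node, push its children, count one per edge), so no call stack and no per-node recursion.
import Mathlib
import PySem

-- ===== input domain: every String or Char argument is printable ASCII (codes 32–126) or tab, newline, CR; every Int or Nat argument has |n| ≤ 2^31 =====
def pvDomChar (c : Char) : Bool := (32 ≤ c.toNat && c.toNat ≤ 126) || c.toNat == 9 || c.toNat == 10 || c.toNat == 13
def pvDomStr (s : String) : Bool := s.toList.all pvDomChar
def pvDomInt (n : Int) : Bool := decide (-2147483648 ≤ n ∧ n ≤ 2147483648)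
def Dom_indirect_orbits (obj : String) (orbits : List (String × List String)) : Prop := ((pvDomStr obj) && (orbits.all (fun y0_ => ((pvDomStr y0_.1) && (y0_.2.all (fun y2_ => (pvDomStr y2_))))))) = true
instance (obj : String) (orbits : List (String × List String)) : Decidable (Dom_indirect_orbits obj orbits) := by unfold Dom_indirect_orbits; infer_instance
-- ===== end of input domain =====

-- B replaces A's recursive descent with an explicit worklist loop that pops a node and pushes
-- its children, accumulating one count per edge (objective: alternative decomposition).
-- Return-value equivalence only; neither program mutates its arguments.

-- ===== PORT A =====
-- A's recursion, with a Nat fuel as a pure totality guard (under Pre_ the recursion depth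
-- is at most orbits.length + 1, strictly below the fuel, so the 0-fuel branch is never taken).
def pvOrbGo (O : List (String × List String)) : Nat → String → Int
  | 0, _ => 0
  | n+1, obj =>
    match (PySem.Dict.mk O).get? obj with
    | none => 0                                   -- if obj not in orbits: return 0
    | some cs =>                                  -- ind_count = 0; for i in orbits[obj]: ...
      cs.foldl (fun acc i => acc + (1 + pvOrbGo O n i)) 0

def indirect_orbits (obj : String) (orbits : List (String × List String)) : Int :=
  pvOrbGo orbits (orbits.length + 2) obj

-- ===== PORT B =====
-- fuel for B's while-loop (totality guard only): the number of loop iterations is the number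
-- of nodes of the unfolded orbit tree, bounded under Pre_ by (ΣchildLists + 1) ^ (|orbits| + 2).
def pvFuelB (O : List (String × List String)) : Nat :=
  ((O.map (fun p => p.2.length)).sum + 1) ^ (O.length + 2)

-- while stack: node = stack.pop(); if node in orbits: for child: count += 1; stack.append(child)
-- (stack head = Python's list end, i.e. the top popped by stack.pop()).
def pvOrbLoop (O : List (String × List String)) : Nat → Int → List String → Int
  | 0, count, _ => count
  | _+1, count, [] => count
  | n+1, count, node :: rest =>
    match (PySem.Dict.mk O).get? node with
    | none => pvOrbLoop O n count rest
    | some cs =>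
      let p := cs.foldl (fun (p : Int × List String) child => (p.1 + 1, child :: p.2)) (count, rest)
      pvOrbLoop O n p.1 p.2

def indirect_orbits_alt (obj : String) (orbits : List (String × List String)) : Int :=
  pvOrbLoop orbits (pvFuelB orbits) 0 [obj]

-- ===== PRECONDITION & SPEC =====
-- bounded-depth height of the orbit chains below x (0 for a non-key)
def pvHgt (O : List (String × List String)) : Nat → String → Nat
  | 0, _ => 0
  | n+1, x =>
    match (PySem.Dict.mk O).get? x with
    | none => 0
    | some cs => cs.foldl (fun a c => max a (1 + pvHgt O n c)) 0

-- Pre_ excludes exactly the inputs on which A's recursion never terminates (Python dies with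
-- RecursionError): those where obj reaches a cycle of the orbit map.  It is stated as a bound
-- on the input's shape: no orbit chain starting at obj is longer than the number of orbit
-- entries (pvHgt measures the longest chain below obj; a cycle reachable from obj forces a
-- chain through it of every length, in particular one of length |orbits| + 2, while without
-- a cycle a chain visits each key at most once).  A returns normally on every admitted input.
def Pre_indirect_orbits (obj : String) (orbits : List (String × List String)) : Prop :=
  pvHgt orbits (orbits.length + 2) obj ≤ orbits.length + 1

instance (obj : String) (orbits : List (String × List String)) : Decidable (Pre_indirect_orbits obj orbits) := by
  unfold Pre_indirect_orbits; infer_instance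

def pvWitness_indirect_orbits : String × (List (String × List String)) :=
  ("COM", [("COM", ["B", "C"]), ("B", ["D"]), ("D", [])])

def Spec_indirect_orbits (obj : String) (orbits : List (String × List String)) (out : Int) : Prop := out = indirect_orbits_alt obj orbits
instance (obj : String) (orbits : List (String × List String)) (out : Int) : Decidable (Spec_indirect_orbits obj orbits out) := by unfold Spec_indirect_orbits; infer_instance

-- ===== CLAIM (what is proved, stated in full; the proofs are below) =====
def Claim_equal_indirect_orbits : Prop := ∀ (obj : String) (orbits : List (String × List String)), Dom_indirect_orbits obj orbits → Pre_indirect_orbits obj orbits → Spec_indirect_orbits obj orbits (indirect_orbits obj orbits)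

-- ===== LEMMAS AND PROOFS =====

-- visit count of the worklist run started at x (proof-only; fuel like pvOrbGo's)
def pvVis (O : List (String × List String)) : Nat → String → Nat
  | 0, _ => 1
  | n+1, x =>
    match (PySem.Dict.mk O).get? x with
    | none => 1
    | some cs => 1 + cs.foldl (fun a c => a + pvVis O n c) 0

def pvStable (O : List (String × List String)) (x : String) : Prop :=
  pvHgt O (O.length + 2) x ≤ O.length + 1

-- unfolding equations ---------------------------------------------------------
theorem pvHgt_succ (O : List (String × List String)) (n : Nat) (x : String) :
    pvHgt O (n+1) x = match (PySem.Dict.mk O).get? x with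
      | none => 0
      | some cs => cs.foldl (fun a c => max a (1 + pvHgt O n c)) 0 := rfl

theorem pvOrbGo_succ (O : List (String × List String)) (n : Nat) (x : String) :
    pvOrbGo O (n+1) x = match (PySem.Dict.mk O).get? x with
      | none => 0
      | some cs => cs.foldl (fun acc i => acc + (1 + pvOrbGo O n i)) 0 := rfl

theorem pvVis_succ (O : List (String × List String)) (n : Nat) (x : String) :
    pvVis O (n+1) x = match (PySem.Dict.mk O).get? x with
      | none => 1
      | some cs => 1 + cs.foldl (fun a c => a + pvVis O n c) 0 := rfl

theorem pvOrbLoop_cons (O : List (String × List String)) (n : Nat) (count : Int)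
    (x : String) (rest : List String) :
    pvOrbLoop O (n+1) count (x :: rest) = match (PySem.Dict.mk O).get? x with
      | none => pvOrbLoop O n count rest
      | some cs =>
        let p := cs.foldl (fun (p : Int × List String) child => (p.1 + 1, child :: p.2)) (count, rest)
        pvOrbLoop O n p.1 p.2 := rfl

theorem pvHgt_some (O : List (String × List String)) (n : Nat) (x : String) (cs : List String)
    (hq : (PySem.Dict.mk O).get? x = some cs) :
    pvHgt O (n+1) x = cs.foldl (fun a c => max a (1 + pvHgt O n c)) 0 := by
  rw [pvHgt_succ, hq]

-- generic foldl helpers -------------------------------------------------------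
theorem pvFoldlCongr {α β : Type} (f g : β → α → β) (cs : List α)
    (h : ∀ b : β, ∀ c ∈ cs, f b c = g b c) : ∀ a : β, cs.foldl f a = cs.foldl g a := by
  induction cs with
  | nil => intro a; rfl
  | cons hd tl ih =>
    intro a
    rw [List.foldl_cons, List.foldl_cons, h a hd (List.mem_cons_self)]
    exact ih (fun b c hc => h b c (List.mem_cons_of_mem _ hc)) _

theorem pvFoldlMaxInit (g : String → Nat) (cs : List String) :
    ∀ a : Nat, a ≤ cs.foldl (fun a c => max a (g c)) a := by
  induction cs with
  | nil => intro a; exact le_refl a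
  | cons hd tl ih =>
    intro a
    rw [List.foldl_cons]
    exact le_trans (le_max_left _ _) (ih _)

theorem pvFoldlMaxMem (g : String → Nat) (cs : List String) (c : String) (hc : c ∈ cs) :
    ∀ a : Nat, g c ≤ cs.foldl (fun a c => max a (g c)) a := by
  induction cs with
  | nil => cases hc
  | cons hd tl ih =>
    intro a
    rw [List.foldl_cons]
    rcases List.mem_cons.mp hc with h | h
    · subst h; exact le_trans (le_max_right _ _) (pvFoldlMaxInit g tl _)
    · exact ih h _

theorem pvSumMapOneAdd (F : String → Int) (cs : List String) :
    (cs.map (fun c => 1 + F c)).sum = (cs.length : Int) + (cs.map F).sum := by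
  induction cs with
  | nil => simp
  | cons hd tl ih =>
    simp only [List.map_cons, List.sum_cons, List.length_cons, ih]
    push_cast
    ring

-- pvHgt facts ----------------------------------------------------------------
theorem pvHgtChild (O : List (String × List String)) (n : Nat) (x c : String)
    (cs : List String) (hq : (PySem.Dict.mk O).get? x = some cs) (hc : c ∈ cs) :
    1 + pvHgt O n c ≤ pvHgt O (n+1) x := by
  rw [pvHgt_succ, hq]
  exact pvFoldlMaxMem (fun c => 1 + pvHgt O n c) cs c hc 0

theorem pvHgtStab (O : List (String × List String)) :
    ∀ (n : Nat) (x : String), pvHgt O n x < n → pvHgt O (n+1) x = pvHgt O n x := by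
  intro n
  induction n with
  | zero => intro x h; omega
  | succ n ih =>
    intro x h
    cases hq : (PySem.Dict.mk O).get? x with
    | none => rw [pvHgt_succ O (n+1) x, hq, pvHgt_succ O n x, hq]
    | some cs =>
      rw [pvHgt_some O n x cs hq] at h
      rw [pvHgt_some O (n+1) x cs hq, pvHgt_some O n x cs hq]
      refine pvFoldlCongr _ _ cs ?_ 0
      intro a c hc
      have hle : 1 + pvHgt O n c ≤ cs.foldl (fun a c => max a (1 + pvHgt O n c)) 0 :=
        pvFoldlMaxMem (fun c => 1 + pvHgt O n c) cs c hc 0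
      have hlt : pvHgt O n c < n := by omega
      rw [ih c hlt]

theorem pvStableChild (O : List (String × List String)) (x c : String) (cs : List String)
    (hx : pvStable O x) (hq : (PySem.Dict.mk O).get? x = some cs) (hc : c ∈ cs) :
    pvStable O c ∧ pvHgt O (O.length + 2) c < pvHgt O (O.length + 2) x := by
  have h1 : 1 + pvHgt O (O.length + 1) c ≤ pvHgt O (O.length + 2) x :=
    pvHgtChild O (O.length + 1) x c cs hq hc
  have h2 : pvHgt O (O.length + 1) c < O.length + 1 := by
    unfold pvStable at hx; omega
  have h3 : pvHgt O (O.length + 2) c = pvHgt O (O.length + 1) c := pvHgtStab O _ c h2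
  constructor
  · unfold pvStable; omega
  · omega

-- stability of pvOrbGo and pvVis ---------------------------------------------
theorem pvOrbGoStab (O : List (String × List String)) :
    ∀ (n : Nat) (x : String), pvHgt O (n+1) x ≤ n → pvOrbGo O (n+2) x = pvOrbGo O (n+1) x := by
  intro n
  induction n with
  | zero =>
    intro x h
    rw [pvOrbGo_succ O 1 x, pvOrbGo_succ O 0 x]
    cases hq : (PySem.Dict.mk O).get? x with
    | none => rfl
    | some cs =>
      simp only []
      cases cs with
      | nil => rfl
      | cons hd tl =>
        exfalso
        have h1 : 1 + pvHgt O 0 hd ≤ pvHgt O (0+1) x :=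
          pvHgtChild O 0 x hd (hd :: tl) hq (List.mem_cons_self)
        omega
  | succ n ih =>
    intro x h
    rw [pvOrbGo_succ O (n+2) x, pvOrbGo_succ O (n+1) x]
    cases hq : (PySem.Dict.mk O).get? x with
    | none => rfl
    | some cs =>
      simp only []
      refine pvFoldlCongr _ _ cs ?_ 0
      intro a c hc
      have h1 : 1 + pvHgt O (n+1) c ≤ pvHgt O (n+2) x :=
        pvHgtChild O (n+1) x c cs hq hc
      have h2 : pvHgt O (n+2) x ≤ n + 1 := h
      have hlt : pvHgt O (n+1) c ≤ n := by omega
      rw [ih c hlt]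

theorem pvVisStab (O : List (String × List String)) :
    ∀ (n : Nat) (x : String), pvHgt O (n+1) x ≤ n → pvVis O (n+2) x = pvVis O (n+1) x := by
  intro n
  induction n with
  | zero =>
    intro x h
    rw [pvVis_succ O 1 x, pvVis_succ O 0 x]
    cases hq : (PySem.Dict.mk O).get? x with
    | none => rfl
    | some cs =>
      simp only []
      cases cs with
      | nil => rfl
      | cons hd tl =>
        exfalso
        have h1 : 1 + pvHgt O 0 hd ≤ pvHgt O (0+1) x :=
          pvHgtChild O 0 x hd (hd :: tl) hq (List.mem_cons_self)
        omega
  | succ n ih =>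
    intro x h
    rw [pvVis_succ O (n+2) x, pvVis_succ O (n+1) x]
    cases hq : (PySem.Dict.mk O).get? x with
    | none => rfl
    | some cs =>
      simp only []
      congr 1
      refine pvFoldlCongr _ _ cs ?_ 0
      intro a c hc
      have h1 : 1 + pvHgt O (n+1) c ≤ pvHgt O (n+2) x :=
        pvHgtChild O (n+1) x c cs hq hc
      have h2 : pvHgt O (n+2) x ≤ n + 1 := h
      have hlt : pvHgt O (n+1) c ≤ n := by omega
      rw [ih c hlt]

-- fixpoint characterisations at the stable fuel O.length + 2 ------------------
theorem pvOrbGoChildStable (O : List (String × List String)) (x c : String) (cs : List String)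
    (hx : pvStable O x) (hq : (PySem.Dict.mk O).get? x = some cs) (hc : c ∈ cs) :
    pvOrbGo O (O.length + 2) c = pvOrbGo O (O.length + 1) c := by
  have h1 : 1 + pvHgt O (O.length + 1) c ≤ pvHgt O (O.length + 2) x :=
    pvHgtChild O (O.length + 1) x c cs hq hc
  have h2 : pvHgt O (O.length + 1) c ≤ O.length := by
    unfold pvStable at hx; omega
  exact pvOrbGoStab O O.length c h2

theorem pvVisChildStable (O : List (String × List String)) (x c : String) (cs : List String)
    (hx : pvStable O x) (hq : (PySem.Dict.mk O).get? x = some cs) (hc : c ∈ cs) :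
    pvVis O (O.length + 2) c = pvVis O (O.length + 1) c := by
  have h1 : 1 + pvHgt O (O.length + 1) c ≤ pvHgt O (O.length + 2) x :=
    pvHgtChild O (O.length + 1) x c cs hq hc
  have h2 : pvHgt O (O.length + 1) c ≤ O.length := by
    unfold pvStable at hx; omega
  exact pvVisStab O O.length c h2

theorem pvOrbGoFix (O : List (String × List String)) (x : String) (cs : List String)
    (hx : pvStable O x) (hq : (PySem.Dict.mk O).get? x = some cs) :
    pvOrbGo O (O.length + 2) x =
      (cs.length : Int) + (cs.map (pvOrbGo O (O.length + 2))).sum := by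
  have hstep : pvOrbGo O (O.length + 2) x =
      cs.foldl (fun acc i => acc + (1 + pvOrbGo O (O.length + 1) i)) 0 := by
    rw [pvOrbGo_succ O (O.length + 1) x, hq]
  rw [hstep,
    pvFoldlCongr _ (fun acc i => acc + (1 + pvOrbGo O (O.length + 2) i)) cs
      (fun a c hc => by simp only [pvOrbGoChildStable O x c cs hx hq hc]) 0,
    PySem.List.foldl_add cs (fun i => 1 + pvOrbGo O (O.length + 2) i) 0,
    pvSumMapOneAdd]
  ring

theorem pvVisFix (O : List (String × List String)) (x : String) (cs : List String)
    (hx : pvStable O x) (hq : (PySem.Dict.mk O).get? x = some cs) :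
    pvVis O (O.length + 2) x = 1 + (cs.map (pvVis O (O.length + 2))).sum := by
  have hstep : pvVis O (O.length + 2) x =
      1 + cs.foldl (fun a c => a + pvVis O (O.length + 1) c) 0 := by
    rw [pvVis_succ O (O.length + 1) x, hq]
  rw [hstep,
    pvFoldlCongr _ (fun a c => a + pvVis O (O.length + 2) c) cs
      (fun a c hc => by simp only [pvVisChildStable O x c cs hx hq hc]) 0,
    PySem.List.foldl_add_nat cs (pvVis O (O.length + 2)) 0]
  omega

theorem pvOrbGoNone (O : List (String × List String)) (x : String)
    (hq : (PySem.Dict.mk O).get? x = none) : pvOrbGo O (O.length + 2) x = 0 := by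
  rw [pvOrbGo_succ O (O.length + 1) x, hq]

theorem pvVisNone (O : List (String × List String)) (x : String)
    (hq : (PySem.Dict.mk O).get? x = none) : pvVis O (O.length + 2) x = 1 := by
  rw [pvVis_succ O (O.length + 1) x, hq]

theorem pvVisPos (O : List (String × List String)) (n : Nat) (x : String) :
    1 ≤ pvVis O n x := by
  cases n with
  | zero => simp [pvVis]
  | succ n =>
    rw [pvVis_succ]
    cases hq : (PySem.Dict.mk O).get? x <;> simp

-- the child-list found by a dict lookup is no longer than the sum of all child lists
theorem pvGetLenLe (O : List (String × List String)) (x : String) (cs : List String)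
    (hq : (PySem.Dict.mk O).get? x = some cs) :
    cs.length ≤ (O.map (fun p => p.2.length)).sum := by
  induction O with
  | nil => simp [PySem.Dict.get?] at hq
  | cons hd tl ih =>
    rw [PySem.Dict.get?_mk_cons] at hq
    simp only [List.map_cons, List.sum_cons]
    by_cases hk : (hd.1 == x) = true
    · rw [if_pos hk] at hq
      cases hq
      omega
    · rw [if_neg hk] at hq
      have := ih hq
      omega

-- visit-count bound: pvVis ≤ (E+1)^(height+1) --------------------------------
theorem pvVisBound (O : List (String × List String)) :
    ∀ (m : Nat) (x : String), pvStable O x → pvHgt O (O.length + 2) x ≤ m →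
      pvVis O (O.length + 2) x ≤ ((O.map (fun p => p.2.length)).sum + 1) ^ (m + 1) := by
  intro m
  induction m with
  | zero =>
    intro x hx hh
    cases hq : (PySem.Dict.mk O).get? x with
    | none =>
      rw [pvVisNone O x hq]
      exact Nat.one_le_pow _ _ (by omega)
    | some cs =>
      cases cs with
      | nil =>
        rw [pvVisFix O x [] hx hq]
        have h1 := Nat.one_le_pow 1 ((O.map (fun p => p.2.length)).sum + 1) (by omega)
        simp only [List.map_nil, List.sum_nil, Nat.add_zero]
        omega
      | cons hd tl =>
        exfalso
        have h1 : 1 + pvHgt O (O.length + 1) hd ≤ pvHgt O (O.length + 2) x :=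
          pvHgtChild O (O.length + 1) x hd (hd :: tl) hq (List.mem_cons_self)
        omega
  | succ m ih =>
    intro x hx hh
    cases hq : (PySem.Dict.mk O).get? x with
    | none =>
      rw [pvVisNone O x hq]
      exact Nat.one_le_pow _ _ (by omega)
    | some cs =>
      rw [pvVisFix O x cs hx hq]
      have hcsE : cs.length ≤ (O.map (fun p => p.2.length)).sum := pvGetLenLe O x cs hq
      set E := (O.map (fun p => p.2.length)).sum with hE
      have hsum : (cs.map (pvVis O (O.length + 2))).sum ≤ cs.length * (E + 1) ^ (m + 1) := by
        have hb : ∀ v ∈ cs.map (pvVis O (O.length + 2)), v ≤ (E + 1) ^ (m + 1) := by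
          intro v hv
          rcases List.mem_map.mp hv with ⟨c, hc, rfl⟩
          rcases pvStableChild O x c cs hx hq hc with ⟨hsc, hlt⟩
          exact ih c hsc (by omega)
        have := List.sum_le_card_nsmul (cs.map (pvVis O (O.length + 2))) ((E + 1) ^ (m + 1)) hb
        simpa [smul_eq_mul] using this
      have hone : 1 ≤ (E + 1) ^ (m + 1) := Nat.one_le_pow _ _ (by omega)
      calc 1 + (cs.map (pvVis O (O.length + 2))).sum
          ≤ 1 + E * (E + 1) ^ (m + 1) := by
            have h5 : cs.length * (E + 1) ^ (m + 1) ≤ E * (E + 1) ^ (m + 1) :=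
              Nat.mul_le_mul_right _ hcsE
            omega
        _ ≤ (E + 1) ^ (m + 1) + E * (E + 1) ^ (m + 1) := by omega
        _ = (E + 1) ^ (m + 1 + 1) := by ring

-- the worklist fold over one child list --------------------------------------
theorem pvFoldPair (cs : List String) :
    ∀ (count : Int) (rest : List String),
      cs.foldl (fun (p : Int × List String) child => (p.1 + 1, child :: p.2)) (count, rest) =
        (count + cs.length, cs.reverse ++ rest) := by
  induction cs with
  | nil => intro count rest; simp
  | cons hd tl ih =>
    intro count rest
    rw [List.foldl_cons, ih (count + 1) (hd :: rest)]
    simp only [List.length_cons, List.reverse_cons, List.append_assoc, List.singleton_append,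
      Prod.mk.injEq]
    constructor
    · push_cast; ring
    · trivial

-- the main worklist invariant -------------------------------------------------
theorem pvLoopInv (O : List (String × List String)) :
    ∀ (n : Nat) (stack : List String) (count : Int),
      (∀ s ∈ stack, pvStable O s) →
      (stack.map (pvVis O (O.length + 2))).sum ≤ n →
      pvOrbLoop O n count stack = count + (stack.map (pvOrbGo O (O.length + 2))).sum := by
  intro n
  induction n with
  | zero =>
    intro stack count hst hv
    cases stack with
    | nil => simp [pvOrbLoop]
    | cons x rest =>
      exfalso
      have := pvVisPos O (O.length + 2) x
      simp only [List.map_cons, List.sum_cons] at hv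
      omega
  | succ n ih =>
    intro stack count hst hv
    cases stack with
    | nil => simp [pvOrbLoop]
    | cons x rest =>
      simp only [List.map_cons, List.sum_cons] at hv ⊢
      rw [pvOrbLoop_cons]
      cases hq : (PySem.Dict.mk O).get? x with
      | none =>
        simp only []
        rw [ih rest count (fun s hs => hst s (List.mem_cons_of_mem _ hs)) ?_,
          pvOrbGoNone O x hq]
        · ring
        · have := pvVisPos O (O.length + 2) x
          omega
      | some cs =>
        have hx : pvStable O x := hst x (List.mem_cons_self)
        simp only [pvFoldPair cs count rest]
        rw [ih (cs.reverse ++ rest) (count + cs.length) ?_ ?_]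
        · rw [List.map_append, List.sum_append, List.map_reverse, List.sum_reverse,
            pvOrbGoFix O x cs hx hq]
          ring
        · intro s hs
          rcases List.mem_append.mp hs with h | h
          · exact (pvStableChild O x s cs hx hq (List.mem_reverse.mp h)).1
          · exact hst s (List.mem_cons_of_mem _ h)
        · rw [List.map_append, List.sum_append, List.map_reverse, List.sum_reverse]
          have := pvVisFix O x cs hx hq
          omega

-- ===== VERDICT (by name: the statement is the Claim_ definition above) =====
theorem indirect_orbits_spec : Claim_equal_indirect_orbits := by
  intro obj O _ hpre
  unfold Spec_indirect_orbits indirect_orbits indirect_orbits_alt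
  unfold Pre_indirect_orbits at hpre
  have hstable : pvStable O obj := hpre
  have hbound : pvVis O (O.length + 2) obj ≤ pvFuelB O := by
    unfold pvFuelB
    exact pvVisBound O (O.length + 1) obj hstable (by unfold pvStable at hstable; omega)
  have hmain := pvLoopInv O (pvFuelB O) [obj] 0
    (by intro s hs; rcases List.mem_singleton.mp hs with rfl; exact hstable)
    (by simpa using hbound)
  simp only [List.map_cons, List.map_nil, List.sum_cons, List.sum_nil] at hmain
  rw [hmain]
  ring
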